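-- pv_equiv track=rewrite | github.com/Adm-Silvan/OCR-Processing-Pipeline | Entity_Extractor/ner.py | combine_text_chunks
-- ===== SOURCE A (Python) =====
-- def combine_text_chunks(segments):
--     # Convert list of single-key dicts into a list of (order, text) tuples
--     order_text_pairs = [(list(d.keys())[0], list(d.values())[0]) for d in segments]
--
--     # Sort by the order key
--     order_text_pairs.sort(key=lambda x: x[0])
--
--     combined_chunks = []
--     current_chunk = []
--     previous_order = None
--
--     for order, text in order_text_pairs:
--         if previous_order is not None and order != previous_order + 1:
--             # Gap detected, start new chunk
--             combined_chunks.append(" ".join(current_chunk))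
--             current_chunk = []
--
--         current_chunk.append(text)
--         previous_order = order
--
--     # Add the final chunk
--     if current_chunk:
--         combined_chunks.append(" ".join(current_chunk))
--
--     return combined_chunks
-- ===== SOURCE B (Python) =====
-- def combine_text_chunks(segments):
--     if not segments:
--         return []
--     pairs = sorted((next(iter(d.items())) for d in segments), key=lambda p: p[0])
--     # staged passes: difference keys (order minus index are equal exactly on a
--     # consecutive run), cut positions where the key changes, then slice-and-join
--     keys = [o - i for i, (o, _) in enumerate(pairs)]
--     cuts = [0] + [i + 1 for i, (x, y) in enumerate(zip(keys, keys[1:])) if x != y] + [len(pairs)]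
--     return [" ".join(t for _, t in pairs[a:b]) for a, b in zip(cuts, cuts[1:])]
-- ===== Notes on version B (the rewrite author's own statement) =====
-- stated objective: alternative
-- what changed: Replaces A's online previous_order state machine (flush-on-gap accumulator plus final flush) by staged offline passes: compute difference keys order-minus-index (constant exactly on a consecutive run), derive the list of cut indices where the key changes, then slice the sorted pairs between consecutive cuts and join each slice.
import Mathlib
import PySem

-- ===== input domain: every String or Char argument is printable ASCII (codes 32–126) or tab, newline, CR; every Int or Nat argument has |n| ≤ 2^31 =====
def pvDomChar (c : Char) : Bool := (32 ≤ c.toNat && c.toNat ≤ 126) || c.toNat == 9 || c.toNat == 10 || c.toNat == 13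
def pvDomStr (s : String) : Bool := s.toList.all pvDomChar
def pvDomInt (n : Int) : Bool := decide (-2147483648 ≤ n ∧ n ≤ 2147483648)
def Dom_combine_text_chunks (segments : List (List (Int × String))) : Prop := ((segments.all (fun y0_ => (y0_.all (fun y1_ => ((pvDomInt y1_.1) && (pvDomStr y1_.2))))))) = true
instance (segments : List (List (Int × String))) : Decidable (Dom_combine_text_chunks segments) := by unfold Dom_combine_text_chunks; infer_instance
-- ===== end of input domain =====

-- B replaces A's previous_order state machine by staged passes: difference keys
-- (order minus index), cut indices where the key changes, slice-and-join (objective: alternative).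

-- ===== PORT A =====
def combine_text_chunks (segments : List (List (Int × String))) : List String :=
  let order_text_pairs := segments.map (fun d =>
    let dd := PySem.Dict.ofList d
    (dd.keys.headD 0, dd.values.headD ""))
  let sortedPairs := PySem.List.sorted order_text_pairs (fun x => x.1) false
  let st := sortedPairs.foldl
    (fun (s : List String × List String × Option Int) p =>
      let flush : Bool := match s.2.2 with
        | some pv => p.1 != pv + 1
        | none => false
      let combined := if flush then s.1 ++ [PySem.Str.join " " s.2.1] else s.1
      let current := if flush then ([] : List String) else s.2.1
      (combined, current ++ [p.2], some p.1))
    ([], [], none)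
  if st.2.1 ≠ [] then st.1 ++ [PySem.Str.join " " st.2.1] else st.1

-- ===== PORT B =====
-- Source B line for line: keys[1:] is ported as keys.drop 1 (exact: start index 1 ≥ 0).
def combine_text_chunks_alt (segments : List (List (Int × String))) : List String :=
  if segments = [] then []
  else
    let pairs := PySem.List.sorted
      (segments.map (fun d => (PySem.Dict.ofList d).items.headD (0, "")))
      (fun p => p.1) false
    let keys : List Int := (PySem.List.enumerate pairs 0).map (fun ip => ip.2.1 - ip.1)
    let cuts : List Int :=
      0 :: ((PySem.List.enumerate (keys.zip (keys.drop 1)) 0).filterMap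
        (fun ix => if ix.2.1 ≠ ix.2.2 then some (ix.1 + 1) else none))
        ++ [(pairs.length : Int)]
    (cuts.zip (cuts.drop 1)).map (fun ab =>
      PySem.Str.join " " ((PySem.List.slice pairs (some ab.1) (some ab.2)).map Prod.snd))

-- ===== PRECONDITION & SPEC =====
-- Pre_ excludes inputs containing an empty dict, on which A raises IndexError (and B StopIteration).
def Pre_combine_text_chunks (segments : List (List (Int × String))) : Prop :=
  ∀ d ∈ segments, d ≠ []
instance (segments : List (List (Int × String))) : Decidable (Pre_combine_text_chunks segments) := by unfold Pre_combine_text_chunks; infer_instance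
def pvWitness_combine_text_chunks : (List (List (Int × String))) := [[(1, "a")], [(3, "b")], [(2, "c")]]

def Spec_combine_text_chunks (segments : List (List (Int × String))) (out : List String) : Prop := out = combine_text_chunks_alt segments
instance (segments : List (List (Int × String))) (out : List String) : Decidable (Spec_combine_text_chunks segments out) := by unfold Spec_combine_text_chunks; infer_instance

-- ===== CLAIM (what is proved, stated in full; the proofs are below) =====
def Claim_equal_combine_text_chunks : Prop := ∀ (segments : List (List (Int × String))), Dom_combine_text_chunks segments → Pre_combine_text_chunks segments → Spec_combine_text_chunks segments (combine_text_chunks segments)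

-- ===== LEMMAS AND PROOFS =====

-- ---- middleman: the natural recursive chunker ----
def pvChunksFrom (run : List String) : List (Int × String) → List String
  | [] => []
  | (o, t) :: rest =>
    let run' := run ++ [t]
    match rest with
    | [] => [PySem.Str.join " " run']
    | (o2, _) :: _ =>
      if o2 == o + 1 then pvChunksFrom run' rest
      else PySem.Str.join " " run' :: pvChunksFrom [] rest

-- ---- A side: loop step, finish, and A-fold = pvChunksFrom ----
def pvStepA (s : List String × List String × Option Int) (p : Int × String) :
    List String × List String × Option Int :=
  let flush : Bool := match s.2.2 with
    | some pv => p.1 != pv + 1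
    | none => false
  let combined := if flush then s.1 ++ [PySem.Str.join " " s.2.1] else s.1
  let current := if flush then ([] : List String) else s.2.1
  (combined, current ++ [p.2], some p.1)

def pvFinishA (s : List String × List String × Option Int) : List String :=
  if s.2.1 ≠ [] then s.1 ++ [PySem.Str.join " " s.2.1] else s.1

def pvTailB (cur : List String) (o : Int) : List (Int × String) → List String
  | [] => [PySem.Str.join " " cur]
  | (o2, t2) :: r =>
    if o2 == o + 1 then pvChunksFrom cur ((o2, t2) :: r)
    else PySem.Str.join " " cur :: pvChunksFrom [] ((o2, t2) :: r)

theorem pvTailB_chunks (run : List String) (o : Int) (t : String)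
    (rest : List (Int × String)) :
    pvChunksFrom run ((o, t) :: rest) = pvTailB (run ++ [t]) o rest := by
  cases rest with
  | nil => simp only [pvChunksFrom, pvTailB]
  | cons p r =>
    obtain ⟨o2, t2⟩ := p
    by_cases h : o2 = o + 1 <;>
      simp only [pvChunksFrom, pvTailB, h, beq_iff_eq, if_true, if_false]

theorem pvLoop_eq (rest : List (Int × String)) :
    ∀ (acc cur : List String) (o : Int), cur ≠ [] →
    pvFinishA (rest.foldl pvStepA (acc, cur, some o)) = acc ++ pvTailB cur o rest := by
  induction rest with
  | nil =>
    intro acc cur o hc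
    simp [pvFinishA, pvTailB, hc]
  | cons p r ih =>
    intro acc cur o hc
    obtain ⟨o2, t2⟩ := p
    by_cases h : o2 = o + 1
    · have : pvStepA (acc, cur, some o) (o2, t2) = (acc, cur ++ [t2], some o2) := by
        simp [pvStepA, h]
      rw [List.foldl_cons, this, ih _ _ _ (by simp)]
      rw [pvTailB, if_pos (by simp [h]), pvTailB_chunks]
    · have : pvStepA (acc, cur, some o) (o2, t2)
          = (acc ++ [PySem.Str.join " " cur], [t2], some o2) := by
        simp [pvStepA, h]
      rw [List.foldl_cons, this, ih _ _ _ (by simp)]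
      rw [pvTailB, if_neg (by simp [h]), pvTailB_chunks]
      simp

theorem pvMain (l : List (Int × String)) :
    pvFinishA (l.foldl pvStepA ([], [], none)) = pvChunksFrom [] l := by
  cases l with
  | nil => simp [pvFinishA, pvChunksFrom]
  | cons p rest =>
    obtain ⟨o, t⟩ := p
    have h1 : pvStepA ([], [], none) (o, t) = ([], [t], some o) := by
      simp [pvStepA]
    rw [List.foldl_cons, h1, pvLoop_eq rest [] [t] o (by simp), pvTailB_chunks]
    simp

-- ---- B side: cut positions ----
def pvCutsAux (n : Int) : List ((Int × String) × (Int × String)) → List Int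
  | [] => []
  | pq :: r => if pq.2.1 ≠ pq.1.1 + 1 then n :: pvCutsAux (n + 1) r else pvCutsAux (n + 1) r

def pvCS (l : List (Int × String)) : List Int :=
  pvCutsAux 1 (l.zip (l.drop 1)) ++ [(l.length : Int)]

def pvJoin (l : List (Int × String)) (ab : Int × Int) : String :=
  PySem.Str.join " " ((PySem.List.slice l (some ab.1) (some ab.2)).map Prod.snd)

-- B's filterMap-over-enumerate expression computes pvIdxAux (s+1) on any pair list
def pvIdxAux (m : Int) : List (Int × Int) → List Int
  | [] => []
  | z :: r => if z.1 ≠ z.2 then m :: pvIdxAux (m + 1) r else pvIdxAux (m + 1) r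

theorem pvIdx_eq (zs : List (Int × Int)) : ∀ (s : Int),
    (PySem.List.enumerate zs s).filterMap
        (fun ix => if ix.2.1 ≠ ix.2.2 then some (ix.1 + 1) else none)
      = pvIdxAux (s + 1) zs := by
  induction zs with
  | nil => intro s; simp [PySem.List.enumerate_nil, pvIdxAux]
  | cons z r ih =>
    intro s
    rw [PySem.List.enumerate_cons]
    by_cases h : z.1 = z.2
    · rw [List.filterMap_cons_none (by simp [h]), ih (s + 1), pvIdxAux,
        if_neg (by simpa using h)]
    · rw [List.filterMap_cons_some (b := s + 1) (by simp [h]), ih (s + 1), pvIdxAux,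
        if_pos (by simpa using h)]

def pvKeys (l : List (Int × String)) (s : Int) : List Int :=
  (PySem.List.enumerate l s).map (fun ip => ip.2.1 - ip.1)

theorem pvKeys_cons (p : Int × String) (l : List (Int × String)) (s : Int) :
    pvKeys (p :: l) s = (p.1 - s) :: pvKeys l (s + 1) := by
  simp [pvKeys, PySem.List.enumerate_cons]

theorem pvIdx_keys (l : List (Int × String)) : ∀ (s m : Int),
    pvIdxAux m ((pvKeys l s).zip ((pvKeys l s).drop 1))
      = pvCutsAux m (l.zip (l.drop 1)) := by
  induction l with
  | nil => intro s m; simp [pvKeys, PySem.List.enumerate_nil, pvIdxAux, pvCutsAux]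
  | cons p r ih =>
    intro s m
    cases r with
    | nil => simp [pvKeys, PySem.List.enumerate_nil, PySem.List.enumerate_cons,
        pvIdxAux, pvCutsAux]
    | cons q r' =>
      rw [pvKeys_cons p (q :: r') s, pvKeys_cons q r' (s + 1)]
      have hL : (((p.1 - s) :: (q.1 - (s + 1)) :: pvKeys r' (s + 1 + 1)).zip
            (((p.1 - s) :: (q.1 - (s + 1)) :: pvKeys r' (s + 1 + 1)).drop 1))
          = (p.1 - s, q.1 - (s + 1)) ::
            (((q.1 - (s + 1)) :: pvKeys r' (s + 1 + 1)).zip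
              (((q.1 - (s + 1)) :: pvKeys r' (s + 1 + 1)).drop 1)) := rfl
      have hR : ((p :: q :: r').zip ((p :: q :: r' : List (Int × String)).drop 1))
          = (p, q) :: ((q :: r').zip ((q :: r' : List (Int × String)).drop 1)) := rfl
      rw [hL, hR]
      have hrec := ih (s + 1) (m + 1)
      rw [pvKeys_cons q r' (s + 1)] at hrec
      by_cases h : q.1 = p.1 + 1
      · rw [pvIdxAux, if_neg (by omega), pvCutsAux, if_neg (by simp [h]), hrec]
      · rw [pvIdxAux, if_pos (by omega), pvCutsAux, if_pos (by simpa using h), hrec]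

theorem pvCutsAux_shift (zs : List ((Int × String) × (Int × String))) :
    ∀ (m : Int), pvCutsAux (m + 1) zs = (pvCutsAux m zs).map (· + 1) := by
  induction zs with
  | nil => intro m; simp [pvCutsAux]
  | cons z r ih =>
    intro m
    by_cases h : z.2.1 = z.1.1 + 1 <;> simp [pvCutsAux, h, ih (m + 1), ih m]

theorem pvCutsAux_le (zs : List ((Int × String) × (Int × String))) :
    ∀ (m x : Int), x ∈ pvCutsAux m zs → m ≤ x := by
  induction zs with
  | nil => intro m x hx; simp [pvCutsAux] at hx
  | cons z r ih =>
    intro m x hx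
    by_cases h : z.2.1 = z.1.1 + 1
    · rw [pvCutsAux, if_neg (by simp [h])] at hx
      have := ih (m + 1) x hx; omega
    · rw [pvCutsAux, if_pos (by simpa using h)] at hx
      rcases List.mem_cons.mp hx with h1 | h2
      · omega
      · have := ih (m + 1) x h2; omega

theorem pvCS_nonneg (l : List (Int × String)) (x : Int) (hx : x ∈ pvCS l) : 0 ≤ x := by
  rcases List.mem_append.mp hx with h | h
  · have := pvCutsAux_le _ _ _ h; omega
  · simp at h; omega

theorem pvCS_ne_nil (l : List (Int × String)) : pvCS l ≠ [] := by
  simp [pvCS]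

-- slicing a cons with shifted nonneg bounds
theorem pvSlice_cons_shift (p : Int × String) (l : List (Int × String)) (a b : Int)
    (ha : 0 ≤ a) (hb : 0 ≤ b) :
    PySem.List.slice (p :: l) (some (a + 1)) (some (b + 1))
      = PySem.List.slice l (some a) (some b) := by
  rw [PySem.List.slice_toNat _ (by omega) (by omega),
      PySem.List.slice_toNat _ ha hb]
  rw [show (a + 1).toNat = a.toNat + 1 from by omega,
      show (b + 1).toNat - (a.toNat + 1) = b.toNat - a.toNat from by omega,
      List.drop_succ_cons]

-- the MAIN lemma: B's cut/slice pipeline equals pvChunksFrom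
theorem pvPipeline (l : List (Int × String)) : ∀ (run : List String), l ≠ [] →
    PySem.Str.join " " (run ++
        (PySem.List.slice l (some 0) (some ((pvCS l).headD 0))).map Prod.snd)
      :: ((pvCS l).zip ((pvCS l).drop 1)).map (pvJoin l)
    = pvChunksFrom run l := by
  induction l with
  | nil => intro run h; exact absurd rfl h
  | cons p tl ih =>
    intro run _
    obtain ⟨o, t⟩ := p
    cases tl with
    | nil =>
      have hcs : pvCS [(o, t)] = [1] := by simp [pvCS, pvCutsAux]
      rw [hcs]
      have hs : PySem.List.slice [(o, t)] (some 0) (some 1) = [(o, t)] := by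
        rw [PySem.List.slice_toNat _ (by omega) (by omega)]; rfl
      simp only [List.headD_cons]
      rw [hs]
      simp [pvChunksFrom]
    | cons q r =>
      obtain ⟨o2, t2⟩ := q
      have htl : ((o2, t2) :: r : List (Int × String)) ≠ [] := by simp
      obtain ⟨c, cx, hcs'⟩ : ∃ c cx, pvCS ((o2, t2) :: r) = c :: cx := by
        cases h : pvCS ((o2, t2) :: r) with
        | nil => exact absurd h (pvCS_ne_nil _)
        | cons c cx => exact ⟨c, cx, rfl⟩
      have hc0 : (0 : Int) ≤ c := pvCS_nonneg ((o2, t2) :: r) c (by rw [hcs']; simp)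
      have hlen : ((((o, t) :: (o2, t2) :: r : List (Int × String)).length : Nat) : Int)
          = (((o2, t2) :: r : List (Int × String)).length : Int) + 1 := by
        push_cast [List.length_cons]; ring
      have hzipl : (((o, t) :: (o2, t2) :: r : List (Int × String)).zip
            (((o, t) :: (o2, t2) :: r : List (Int × String)).drop 1))
          = ((o, t), (o2, t2)) :: (((o2, t2) :: r : List (Int × String)).zip
              (((o2, t2) :: r : List (Int × String)).drop 1)) := rfl
      have hzip_shift :
          (((pvCS ((o2, t2) :: r)).map (· + 1)).zip (((pvCS ((o2, t2) :: r)).map (· + 1)).drop 1)).map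
              (pvJoin ((o, t) :: (o2, t2) :: r))
            = ((pvCS ((o2, t2) :: r)).zip ((pvCS ((o2, t2) :: r)).drop 1)).map (pvJoin ((o2, t2) :: r)) := by
        rw [← List.map_drop, List.zip_map, List.map_map]
        apply List.map_congr_left
        intro ab hab
        obtain ⟨a, b⟩ := ab
        have hmem := List.of_mem_zip hab
        have ha : 0 ≤ a := pvCS_nonneg _ _ hmem.1
        have hb : 0 ≤ b := pvCS_nonneg _ _ (List.mem_of_mem_drop hmem.2)
        simp only [Function.comp_apply, Prod.map_apply, pvJoin]
        rw [pvSlice_cons_shift _ _ _ _ ha hb]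
      by_cases hgap : o2 = o + 1
      · -- consecutive: first run extends through q
        have hcuts : pvCS ((o, t) :: (o2, t2) :: r) = (pvCS ((o2, t2) :: r)).map (· + 1) := by
          unfold pvCS
          rw [hzipl, pvCutsAux, if_neg (by simp [hgap]),
              pvCutsAux_shift _ 1, List.map_append, hlen]
          rfl
        rw [hcuts, hzip_shift, hcs']
        simp only [List.map_cons, List.headD_cons]
        have hslice : PySem.List.slice ((o, t) :: (o2, t2) :: r) (some 0) (some (c + 1))
            = (o, t) :: PySem.List.slice ((o2, t2) :: r) (some 0) (some c) := by
          rw [PySem.List.slice_toNat _ (by omega) (by omega),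
              PySem.List.slice_toNat _ (by omega) hc0]
          have h1 : (c + 1).toNat - (0 : Int).toNat = (c.toNat - (0 : Int).toNat) + 1 := by
            omega
          rw [h1]
          simp [List.take_succ_cons]
        rw [hslice]
        simp only [List.map_cons]
        have hih := ih (run ++ [t]) htl
        rw [hcs'] at hih
        simp only [List.headD_cons] at hih
        rw [show run ++ (t :: (PySem.List.slice ((o2, t2) :: r) (some 0) (some c)).map Prod.snd)
            = (run ++ [t]) ++ (PySem.List.slice ((o2, t2) :: r) (some 0) (some c)).map Prod.snd by
          simp]
        rw [hih]
        rw [show pvChunksFrom run ((o, t) :: (o2, t2) :: r)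
            = pvChunksFrom (run ++ [t]) ((o2, t2) :: r) from by
          simp [pvChunksFrom, hgap]]
      · -- gap after the head: first chunk is exactly [t]
        have hcuts : pvCS ((o, t) :: (o2, t2) :: r) = 1 :: (pvCS ((o2, t2) :: r)).map (· + 1) := by
          unfold pvCS
          rw [hzipl, pvCutsAux, if_pos (by simpa using hgap),
              pvCutsAux_shift _ 1, List.cons_append, List.map_append, hlen]
          rfl
        rw [hcuts, hcs']
        have hslice1 : PySem.List.slice ((o, t) :: (o2, t2) :: r) (some 0) (some 1)
            = [(o, t)] := by
          rw [PySem.List.slice_toNat _ (by omega) (by omega)]; rfl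
        simp only [List.map_cons, List.headD_cons, List.drop_succ_cons, List.drop_zero,
          List.zip_cons_cons]
        rw [hslice1]
        have hfirst : pvJoin ((o, t) :: (o2, t2) :: r) (1, c + 1)
            = PySem.Str.join " "
                ((PySem.List.slice ((o2, t2) :: r) (some 0) (some c)).map Prod.snd) := by
          unfold pvJoin
          have hs := pvSlice_cons_shift (o, t) ((o2, t2) :: r) 0 c (by omega) hc0
          norm_num at hs
          rw [hs, PySem.List.slice_zero_start]
        simp only [List.map_cons]
        rw [hfirst]
        have hz2 : (((c + 1) :: cx.map (· + 1)).zip (cx.map (· + 1))).map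
              (pvJoin ((o, t) :: (o2, t2) :: r))
            = ((c :: cx).zip ((c :: cx : List Int).drop 1)).map (pvJoin ((o2, t2) :: r)) := by
          have h3 := hzip_shift
          rw [hcs'] at h3
          simp only [List.map_cons, List.drop_succ_cons, List.drop_zero] at h3
          simpa using h3
        rw [hz2]
        have hih := ih [] htl
        rw [hcs'] at hih
        simp only [List.headD_cons, List.nil_append] at hih
        simp only [List.map_nil]
        rw [hih]
        rw [show pvChunksFrom run ((o, t) :: (o2, t2) :: r)
            = PySem.Str.join " " (run ++ [t]) :: pvChunksFrom [] ((o2, t2) :: r) from by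
          simp [pvChunksFrom, hgap]]

-- first-item bridge: next(iter(d.items())) versus (keys[0], values[0])
theorem pvItems_head (d : List (Int × String)) :
    (PySem.Dict.ofList d).items.headD (0, "")
      = ((PySem.Dict.ofList d).keys.headD 0, (PySem.Dict.ofList d).values.headD "") := by
  cases h : (PySem.Dict.ofList d).items with
  | nil => simp [PySem.Dict.keys, PySem.Dict.values, h]
  | cons p r => simp [PySem.Dict.keys, PySem.Dict.values, h]

-- pvIdx_keys at the definitionally-unfolded pvKeys form (for rewriting in pvAltMain)
theorem pvIdx_keys' (l : List (Int × String)) :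
    pvIdxAux 1
        ((((PySem.List.enumerate l 0).map (fun ip => ip.2.1 - ip.1)).zip
          (((PySem.List.enumerate l 0).map (fun ip => ip.2.1 - ip.1)).drop 1)))
      = pvCutsAux 1 (l.zip (l.drop 1)) := pvIdx_keys l 0 1

-- B's whole body equals pvChunksFrom [] of the sorted pairs
theorem pvBcore (l : List (Int × String)) (hlnil : l ≠ []) :
    (let keys : List Int := (PySem.List.enumerate l 0).map (fun ip => ip.2.1 - ip.1)
     let cuts : List Int :=
       0 :: ((PySem.List.enumerate (keys.zip (keys.drop 1)) 0).filterMap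
         (fun ix => if ix.2.1 ≠ ix.2.2 then some (ix.1 + 1) else none))
         ++ [(l.length : Int)]
     (cuts.zip (cuts.drop 1)).map (fun ab =>
       PySem.Str.join " " ((PySem.List.slice l (some ab.1) (some ab.2)).map Prod.snd)))
    = pvChunksFrom [] l := by
  dsimp only
  rw [pvIdx_eq, show (0 : Int) + 1 = 1 from rfl, pvIdx_keys' l]
  change ((((0 : Int) :: pvCS l).zip (((0 : Int) :: pvCS l).drop 1)).map (pvJoin l))
    = pvChunksFrom [] l
  obtain ⟨c, cx, hc⟩ : ∃ c cx, pvCS l = c :: cx := by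
    cases h : pvCS l with
    | nil => exact absurd h (pvCS_ne_nil _)
    | cons c cx => exact ⟨c, cx, rfl⟩
  rw [hc]
  simp only [List.drop_succ_cons, List.drop_zero, List.zip_cons_cons, List.map_cons]
  have hmain := pvPipeline l [] hlnil
  rw [hc] at hmain
  simp only [List.headD_cons, List.nil_append] at hmain
  rw [← hmain]
  rfl

theorem pvAltMain (segments : List (List (Int × String))) :
    combine_text_chunks_alt segments
      = pvChunksFrom []
          (PySem.List.sorted (segments.map (fun d =>
            let dd := PySem.Dict.ofList d
            (dd.keys.headD 0, dd.values.headD "")))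
            (fun x => x.1) false) := by
  unfold combine_text_chunks_alt
  by_cases hseg : segments = []
  · subst hseg
    have hnil : PySem.List.sorted ([] : List (Int × String)) (fun x => x.1) false = [] :=
      (PySem.List.sorted_eq_nil_iff _ _ _).mpr rfl
    simp [hnil, pvChunksFrom]
  · rw [if_neg hseg]
    have hpairs : segments.map (fun d => (PySem.Dict.ofList d).items.headD (0, ""))
        = segments.map (fun d =>
            let dd := PySem.Dict.ofList d
            (dd.keys.headD 0, dd.values.headD "")) :=
      List.map_congr_left (fun d _ => pvItems_head d)
    rw [hpairs]
    have hlnil : PySem.List.sorted (segments.map (fun d =>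
        let dd := PySem.Dict.ofList d
        (dd.keys.headD 0, dd.values.headD ""))) (fun x => x.1) false ≠ [] := by
      intro h
      exact hseg (by simpa using (PySem.List.sorted_eq_nil_iff _ _ _).mp h)
    exact pvBcore _ hlnil

-- ===== VERDICT (by name: the statement is the Claim_ definition above) =====
theorem combine_text_chunks_spec : Claim_equal_combine_text_chunks := by
  intro segments _ _
  unfold Spec_combine_text_chunks combine_text_chunks
  rw [pvAltMain]
  exact pvMain _
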